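-- pv_equiv track=rewrite | github.com/tbgitoo/AeolusAndroid | doc/similaritySearch/aeolus_embed/features.py | _max_run_direction
-- ===== SOURCE A (Python) =====
-- def _max_run_direction(d):
--     if not d: return 0
--     def sgn(x): return -1 if x<0 else (1 if x>0 else 0)
--     prev=sgn(d[0]); best=1; cur=1
--     for i in range(1,len(d)):
--         k=sgn(d[i])
--         if k==prev: cur+=1
--         else: best=max(best,cur); cur=1; prev=k
--     return max(best,cur)
-- ===== SOURCE B (Python) =====
-- def _max_run_direction(d):
--     def sgn(x): return -1 if x<0 else (1 if x>0 else 0)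
--     s = [sgn(x) for x in d]
--     cuts = [0] + [i for i, (u, v) in enumerate(zip(s, s[1:]), 1) if u != v] + [len(s)]
--     gaps = [b - a for a, b in zip(cuts, cuts[1:])]
--     return max(gaps, default=0)
-- ===== Notes on version B (the rewrite author's own statement) =====
-- stated objective: alternative
-- what changed: A maintains prev/best/cur running counters in a single loop; B instead maps the list to signs, collects the boundary positions where the sign changes, and returns the largest gap between consecutive boundaries (max with default 0).
import Mathlib
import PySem

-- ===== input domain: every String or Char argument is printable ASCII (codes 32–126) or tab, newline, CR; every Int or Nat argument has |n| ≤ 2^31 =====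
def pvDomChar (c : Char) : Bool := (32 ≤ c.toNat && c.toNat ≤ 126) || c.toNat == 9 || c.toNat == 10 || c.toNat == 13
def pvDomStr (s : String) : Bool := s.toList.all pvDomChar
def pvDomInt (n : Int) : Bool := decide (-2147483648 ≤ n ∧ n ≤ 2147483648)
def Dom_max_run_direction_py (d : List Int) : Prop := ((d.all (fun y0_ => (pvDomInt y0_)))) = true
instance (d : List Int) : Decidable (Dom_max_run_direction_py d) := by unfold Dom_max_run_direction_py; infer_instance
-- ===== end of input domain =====

-- B replaces A's prev/best/cur counter loop by a boundary decomposition: it records the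
-- positions where the sign changes and returns the largest gap between consecutive
-- boundaries (objective: alternative; no running counters are maintained).

-- ===== PORT A =====
-- sgn(x), the inner helper both Pythons define identically
def pvSgn (x : Int) : Int := if x < 0 then -1 else (if x > 0 then 1 else 0)

def max_run_direction_py (d : List Int) : Int :=
  match d with
  | [] => 0
  | _ :: _ =>
    -- prev=sgn(d[0]); best=1; cur=1; for i in range(1,len(d)): …
    let st :=
      (PySem.List.pyRange 1 (PySem.List.len d) 1).foldl
        (fun (st : Int × Int × Int) i =>
          let k := pvSgn (PySem.List.pyGetD d i 0)
          if k = st.1 then (st.1, st.2.1, st.2.2 + 1)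
          else (k, max st.2.1 st.2.2, 1))
        (pvSgn (PySem.List.pyGetD d 0 0), 1, 1)
    max st.2.1 st.2.2

-- ===== PORT B =====
def max_run_direction_py_alt (d : List Int) : Int :=
  let s := d.map pvSgn
  let cuts : List Int :=
    [0]
      ++ ((PySem.List.enumerate (s.zip (PySem.List.slice s (some 1) none)) 1).filter
            (fun e => e.2.1 != e.2.2)).map (fun e => e.1)
      ++ [(PySem.List.len s)]
  let gaps := (cuts.zip (PySem.List.slice cuts (some 1) none)).map (fun p => p.2 - p.1)
  PySem.List.maxD gaps (fun x => x) 0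

-- ===== PRECONDITION & SPEC =====
def Spec_max_run_direction_py (d : List Int) (out : Int) : Prop := out = max_run_direction_py_alt d
instance (d : List Int) (out : Int) : Decidable (Spec_max_run_direction_py d out) := by unfold Spec_max_run_direction_py; infer_instance

-- ===== CLAIM (what is proved, stated in full; the proofs are below) =====
def Claim_equal_max_run_direction_py : Prop := ∀ (d : List Int), Dom_max_run_direction_py d → Spec_max_run_direction_py d (max_run_direction_py d)

-- ===== LEMMAS AND PROOFS =====

-- the list of run lengths of the sign list p :: m, seeded with a current run of length cur
def pvExtRuns (p cur : Int) : List Int → List Int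
  | [] => [cur]
  | y :: ys => if y = p then pvExtRuns p (cur + 1) ys else cur :: pvExtRuns y 1 ys

lemma pvExtRuns_pos : ∀ (m : List Int) (p cur : Int), 1 ≤ cur →
    ∀ y ∈ pvExtRuns p cur m, 1 ≤ y := by
  intro m
  induction m with
  | nil => intro p cur h y hy; simp [pvExtRuns] at hy; omega
  | cons z zs ih =>
    intro p cur h y hy
    by_cases hz : z = p
    · simp only [pvExtRuns, if_pos hz] at hy
      exact ih p (cur + 1) (by omega) y hy
    · simp only [pvExtRuns, if_neg hz, List.mem_cons] at hy
      rcases hy with h1 | h1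
      · omega
      · exact ih z 1 (by omega) y h1

lemma pvExtRuns_ne_nil : ∀ (m : List Int) (p cur : Int), pvExtRuns p cur m ≠ [] := by
  intro m p cur
  cases m with
  | nil => simp [pvExtRuns]
  | cons y ys =>
    simp only [pvExtRuns]
    split
    · exact pvExtRuns_ne_nil ys p (cur + 1)
    · simp

lemma pv_foldl_max_shift : ∀ (l : List Int) (a b : Int),
    List.foldl max (max a b) l = max a (List.foldl max b l) := by
  intro l
  induction l with
  | nil => intro a b; rfl
  | cons x xs ih =>
    intro a b
    simp only [List.foldl_cons, max_assoc]
    exact ih a (max b x)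

-- A's loop over the tail computes max best (max of the seeded run lengths)
lemma pvA_loop (m : List Int) : ∀ (p best cur : Int), 1 ≤ cur →
    (let st := m.foldl
        (fun (st : Int × Int × Int) v =>
          if pvSgn v = st.1 then (st.1, st.2.1, st.2.2 + 1)
          else (pvSgn v, max st.2.1 st.2.2, 1)) (p, best, cur)
     max st.2.1 st.2.2)
      = max best (List.foldl max 0 (pvExtRuns p cur (m.map pvSgn))) := by
  induction m with
  | nil => intro p best cur h; simp [pvExtRuns]; omega
  | cons x xs ih =>
    intro p best cur h
    by_cases hx : pvSgn x = p
    · simp only [List.map_cons, List.foldl_cons, pvExtRuns, hx]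
      exact ih p best (cur + 1) (by omega)
    · simp only [List.map_cons, List.foldl_cons, if_neg hx, pvExtRuns, List.foldl_cons]
      rw [ih (pvSgn x) (max best cur) 1 (by omega)]
      have h0 : max (0 : Int) cur = max cur 0 := by omega
      rw [h0, pv_foldl_max_shift, max_assoc]

-- B's boundary list turned into gaps is exactly the run-length list
lemma pvB_gaps : ∀ (m : List Int) (p c cur : Int),
    (((c :: ((((PySem.List.enumerate ((p :: m).zip m) (c + cur)).filter
          (fun e => e.2.1 != e.2.2)).map (fun e => e.1)) ++ [c + cur + m.length]))).zip
       ((((PySem.List.enumerate ((p :: m).zip m) (c + cur)).filter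
          (fun e => e.2.1 != e.2.2)).map (fun e => e.1)) ++ [c + cur + m.length])).map
      (fun pr => pr.2 - pr.1)
      = pvExtRuns p cur m := by
  intro m
  induction m with
  | nil => intro p c cur; simp [pvExtRuns, PySem.List.enumerate_nil]
  | cons y ys ih =>
    intro p c cur
    by_cases hy : y = p
    · subst hy
      have h1 := ih y c (cur + 1)
      simp only [List.zip_cons_cons, PySem.List.enumerate_cons, List.filter_cons,
        bne_self_eq_false, Bool.false_eq_true, if_false, pvExtRuns, if_true, List.length_cons, Nat.cast_add, Nat.cast_one]
      rw [show (c + cur + ((ys.length : Int) + 1)) = c + (cur + 1) + ys.length by ring,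
        show (c + cur + 1 : Int) = c + (cur + 1) by ring]
      exact h1
    · have h1 := ih y (c + cur) 1
      have hb : ((p != y) = true) := by simp [bne_iff_ne]; exact fun h => hy h.symm
      simp only [List.zip_cons_cons, PySem.List.enumerate_cons, List.filter_cons, hb,
        if_true, List.map_cons, pvExtRuns, if_neg hy, List.length_cons, List.zip_cons_cons,
        List.map_cons, Nat.cast_add, Nat.cast_one]
      rw [show (c + cur + ((ys.length : Int) + 1)) = (c + cur) + 1 + ys.length by ring,
        show (c + cur + 1 : Int) = (c + cur) + 1 by ring]
      simp only [List.cons_append]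
      rw [List.zip_cons_cons, List.map_cons, h1]
      congr 1
      ring

-- Python's max(gaps, default=0) on a nonempty list of values ≥ 1
lemma pv_maxD (r : List Int) (hne : r ≠ []) (hpos : ∀ y ∈ r, 1 ≤ y) :
    PySem.List.maxD r (fun x => x) 0 = max 1 (List.foldl max 0 r) := by
  cases r with
  | nil => exact absurd rfl hne
  | cons h tl =>
    unfold PySem.List.maxD
    rw [PySem.List.max?_id_cons, Option.getD_some]
    have hh : 1 ≤ h := hpos h (by simp)
    have h0 : max (0 : Int) h = h := by omega
    rw [List.foldl_cons, h0]
    have hle := (PySem.List.le_foldl_max tl h).1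
    omega

-- ===== VERDICT (by name: the statement is the Claim_ definition above) =====
theorem max_run_direction_py_spec : Claim_equal_max_run_direction_py := by
  intro d _
  unfold Spec_max_run_direction_py
  cases d with
  | nil => decide
  | cons x t =>
    unfold max_run_direction_py max_run_direction_py_alt
    simp only [List.map_cons, PySem.List.slice_from_one, List.tail_cons]
    rw [PySem.List.foldl_pyRange_pyGetD (x :: t) 0
      (fun (st : Int × Int × Int) v =>
        if pvSgn v = st.1 then (st.1, st.2.1, st.2.2 + 1)
        else (pvSgn v, max st.2.1 st.2.2, 1)) _ (by norm_num)]
    simp only [Int.toNat_one, List.drop_one, List.tail_cons, PySem.List.pyGetD_zero_cons]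
    rw [pvA_loop t (pvSgn x) 1 1 (by omega)]
    have hg := pvB_gaps (t.map pvSgn) (pvSgn x) 0 1
    simp only [zero_add] at hg
    have hlen : (PySem.List.len (pvSgn x :: t.map pvSgn) : Int) = 1 + (t.map pvSgn).length := by
      simp [PySem.List.len]; ring
    rw [List.singleton_append, hlen]
    simp only [List.cons_append, List.tail_cons]
    rw [hg, pv_maxD _ (pvExtRuns_ne_nil _ _ _) (pvExtRuns_pos _ _ _ (by omega))]
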